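-- pv_equiv track=rewrite | github.com/SDeBeukeleer/momentum | scripts/generate_v9_car_200.py | get_reference_day
-- ===== SOURCE A (Python) =====
-- def get_reference_day(day: int) -> int:
--     """Get the best reference image day for consistency."""
--     if day <= 1:
--         return None
--
--     # Use milestone-based references for stability
--     # Phase boundaries: 1, 20, 40, 60, 80, 100, 120, 140, 160, 180
--     milestones = [1, 20, 40, 60, 80, 100, 120, 140, 160, 180]
--
--     for i, m in enumerate(milestones):
--         if day <= m:
--             if i == 0:
--                 return None
--             return milestones[i-1]
--     return 180  # For days 181-200
-- ===== SOURCE B (Python) =====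
-- def get_reference_day(day: int) -> int:
--     """Closed-form milestone lookup: milestones are 1 then multiples of 20 up to 180."""
--     if day <= 1:
--         return None
--     if day > 180:
--         return 180
--     if day <= 20:
--         return 1
--     return ((day - 1) // 20) * 20
-- ===== Notes on version B (the rewrite author's own statement) =====
-- stated objective: simpler
-- what changed: Replaced the enumerate-scan over the milestone list (with a back-step to the previous milestone) by a closed-form arithmetic map exploiting the even spacing of the milestones; no list or loop remains.
import Mathlib
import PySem

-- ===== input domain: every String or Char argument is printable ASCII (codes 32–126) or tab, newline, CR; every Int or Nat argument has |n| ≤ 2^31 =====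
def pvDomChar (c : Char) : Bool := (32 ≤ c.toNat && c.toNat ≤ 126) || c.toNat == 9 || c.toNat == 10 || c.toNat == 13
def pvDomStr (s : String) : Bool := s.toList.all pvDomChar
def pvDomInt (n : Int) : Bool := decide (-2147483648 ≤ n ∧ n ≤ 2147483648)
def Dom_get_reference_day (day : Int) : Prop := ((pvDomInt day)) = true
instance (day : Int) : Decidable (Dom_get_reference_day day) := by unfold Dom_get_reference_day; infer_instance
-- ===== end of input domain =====

-- B replaces A's milestone-list scan by a closed-form arithmetic formula (simpler; return value only).

-- ===== PORT A =====
def pvMilestones : List Int := [1, 20, 40, 60, 80, 100, 120, 140, 160, 180]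

-- the 'for i, m in enumerate(milestones)' loop; falls through to 'return 180'
def pvScan (day : Int) : List (Int × Int) → Option Int
  | [] => some 180
  | (i, m) :: rest =>
      if day ≤ m then
        if i = 0 then none
        else PySem.List.pyGet? pvMilestones (i - 1)
      else pvScan day rest

def get_reference_day (day : Int) : Option Int :=
  if day ≤ 1 then none
  else pvScan day (PySem.List.enumerate pvMilestones)

-- ===== PORT B =====
def get_reference_day_alt (day : Int) : Option Int :=
  if day ≤ 1 then none
  else if day > 180 then some 180
  else if day ≤ 20 then some 1
  else some (PySem.Int.floordiv (day - 1) 20 * 20)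

-- ===== PRECONDITION & SPEC =====
def Spec_get_reference_day (day : Int) (out : Option Int) : Prop := out = get_reference_day_alt day
instance (day : Int) (out : Option Int) : Decidable (Spec_get_reference_day day out) := by unfold Spec_get_reference_day; infer_instance

-- ===== CLAIM (what is proved, stated in full; the proofs are below) =====
def Claim_equal_get_reference_day : Prop := ∀ (day : Int), Dom_get_reference_day day → Spec_get_reference_day day (get_reference_day day)

-- ===== LEMMAS AND PROOFS =====

-- ===== VERDICT (by name: the statement is the Claim_ definition above) =====
theorem get_reference_day_spec : Claim_equal_get_reference_day := by
  intro day _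
  unfold Spec_get_reference_day get_reference_day get_reference_day_alt
  rw [show PySem.Int.floordiv (day - 1) 20 = (day - 1) / 20 from
        PySem.Int.floordiv_eq_ediv_of_pos (by omega)]
  simp only [pvMilestones, PySem.List.enumerate_cons, PySem.List.enumerate_nil, pvScan]
  norm_num [PySem.List.pyGet?, PySem.List.pyIdx?]
  split_ifs <;> simp <;> omega
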